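-- pv_equiv track=rewrite | github.com/LingjieJin/DataStruct | python/code/PTA-数据结构和算法-期末复习题/7-3栈操作的合法性.py | is_valid_stack_sequence
-- ===== SOURCE A (Python) =====
-- def is_valid_stack_sequence(sequence, max_capacity):
--     """判断给定的堆栈操作序列是否合法"""
--     stack_size = 0  # 当前堆栈的大小
--
--     for operation in sequence:
--         if operation == 'S':  # 入栈操作
--             stack_size += 1
--             # 检查是否超过最大容量
--             if stack_size > max_capacity:
--                 return "NO"
--         elif operation == 'X':  # 出栈操作
--             stack_size -= 1
--             # 检查出栈时栈是否为空
--             if stack_size < 0: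
--                 return "NO"
--
--     # 检查最后栈是否为空
--     return "YES" if stack_size == 0 else "NO"
-- ===== SOURCE B (Python) =====
-- def is_valid_stack_sequence(sequence, max_capacity):
--     """Prefix-sum table check instead of an early-exit state machine."""
--     deltas = [1 if op == 'S' else -1 if op == 'X' else 0 for op in sequence]
--     prefix = [0]
--     for d in deltas:
--         prefix.append(prefix[-1] + d)
--     ok = (prefix[-1] == 0
--           and all(p <= max_capacity for p in prefix)
--           and all(p >= 0 for p in prefix))
--     return "YES" if ok else "NO"
-- ===== Notes on version B (the rewrite author's own statement) =====
-- stated objective: alternative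
-- what changed: Replaces the early-exit state machine by building the full table of prefix stack sizes and then checking the last is 0, all are <= max_capacity and all are >= 0.
-- outside the precondition, e.g. on is_valid_stack_sequence([], -1): A returns 'YES', B returns 'NO'
import Mathlib
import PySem

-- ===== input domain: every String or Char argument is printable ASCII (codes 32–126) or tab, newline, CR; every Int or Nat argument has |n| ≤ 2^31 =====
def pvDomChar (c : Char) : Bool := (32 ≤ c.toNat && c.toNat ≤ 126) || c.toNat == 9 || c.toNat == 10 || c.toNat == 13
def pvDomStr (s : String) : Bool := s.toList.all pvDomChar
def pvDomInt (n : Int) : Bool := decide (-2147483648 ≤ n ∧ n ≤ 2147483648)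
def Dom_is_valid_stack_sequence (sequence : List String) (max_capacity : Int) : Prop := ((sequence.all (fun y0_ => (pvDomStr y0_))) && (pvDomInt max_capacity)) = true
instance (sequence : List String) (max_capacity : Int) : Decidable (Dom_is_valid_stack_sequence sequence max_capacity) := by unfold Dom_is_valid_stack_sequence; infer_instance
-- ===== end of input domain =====

-- B replaces A's early-exit state machine by a prefix-sum table checked afterwards (same cost, different decomposition).

-- ===== PORT A =====
-- A's for-loop with its early returns, as structural recursion carrying stack_size
def pvGoA : List String → Int → Int → String
  | [], _, stack_size => if stack_size = 0 then "YES" else "NO"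
  | operation :: rest, max_capacity, stack_size =>
    if operation == "S" then
      if stack_size + 1 > max_capacity then "NO" else pvGoA rest max_capacity (stack_size + 1)
    else if operation == "X" then
      if stack_size - 1 < 0 then "NO" else pvGoA rest max_capacity (stack_size - 1)
    else pvGoA rest max_capacity stack_size

def is_valid_stack_sequence (sequence : List String) (max_capacity : Int) : String :=
  pvGoA sequence max_capacity 0

-- ===== PORT B =====
def is_valid_stack_sequence_alt (sequence : List String) (max_capacity : Int) : String :=
  let deltas := sequence.map (fun op => if op == "S" then (1 : Int) else if op == "X" then (-1 : Int) else 0)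
  let pref := deltas.foldl (fun acc d => acc ++ [acc.getLast! + d]) [(0 : Int)]
  if pref.getLast! == 0
     && pref.all (fun p => decide (p ≤ max_capacity))
     && pref.all (fun p => decide (0 ≤ p))
  then "YES" else "NO"

-- ===== PRECONDITION & SPEC =====
-- Pre_ restricts to the natural domain of a capacity: nonnegative. A never compares the initial
-- empty stack against the capacity, so for a negative capacity it returns an accidental "YES" on
-- push-free sequences, which B's whole-table check does not reproduce.
def Pre_is_valid_stack_sequence (sequence : List String) (max_capacity : Int) : Prop :=
  0 ≤ max_capacity
instance (sequence : List String) (max_capacity : Int) : Decidable (Pre_is_valid_stack_sequence sequence max_capacity) := by unfold Pre_is_valid_stack_sequence; infer_instance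

def pvWitness_is_valid_stack_sequence : List String × Int := (["S", "X", "S", "a", "X"], 2)

def Spec_is_valid_stack_sequence (sequence : List String) (max_capacity : Int) (out : String) : Prop := out = is_valid_stack_sequence_alt sequence max_capacity
instance (sequence : List String) (max_capacity : Int) (out : String) : Decidable (Spec_is_valid_stack_sequence sequence max_capacity out) := by unfold Spec_is_valid_stack_sequence; infer_instance

-- ===== CLAIM (what is proved, stated in full; the proofs are below) =====
def Claim_equal_is_valid_stack_sequence : Prop := ∀ (sequence : List String) (max_capacity : Int), Dom_is_valid_stack_sequence sequence max_capacity → Pre_is_valid_stack_sequence sequence max_capacity → Spec_is_valid_stack_sequence sequence max_capacity (is_valid_stack_sequence sequence max_capacity)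

-- ===== LEMMAS AND PROOFS =====

def pvDelta (op : String) : Int := if op == "S" then 1 else if op == "X" then -1 else 0

-- B's final check, phrased over the scanl of the deltas
def pvCheck (cap s : Int) (ds : List Int) : String :=
  if (List.scanl (· + ·) s ds).getLast! == 0
     && (List.scanl (· + ·) s ds).all (fun p => decide (p ≤ cap))
     && (List.scanl (· + ·) s ds).all (fun p => decide (0 ≤ p))
  then "YES" else "NO"

lemma pvGetLast!_concat (l : List Int) (x : Int) : (l ++ [x]).getLast! = x := by
  induction l with
  | nil => rfl
  | cons a t ih =>
    cases t with
    | nil => rfl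
    | cons b t' => simpa using ih

lemma pvGetLast!_cons (a : Int) (l : List Int) (h : l ≠ []) :
    (a :: l).getLast! = l.getLast! := by
  cases l with
  | nil => cases h rfl
  | cons b t => rfl

lemma pvScanl_cons_ex (y : Int) (ds : List Int) :
    ∃ t, List.scanl (· + ·) y ds = y :: t := by
  cases ds with
  | nil => exact ⟨[], List.scanl_nil⟩
  | cons d ds => exact ⟨_, List.scanl_cons⟩

lemma pvScanl_ne_nil (y : Int) (ds : List Int) : List.scanl (· + ·) y ds ≠ [] := by
  obtain ⟨t, ht⟩ := pvScanl_cons_ex y ds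
  simp [ht]

-- Source B's append loop builds exactly the scanl of the running sums
lemma pvBuild_eq_scanl : ∀ (ds l : List Int) (x : Int),
    ds.foldl (fun acc d => acc ++ [acc.getLast! + d]) (l ++ [x])
      = l ++ List.scanl (· + ·) x ds := by
  intro ds
  induction ds with
  | nil => intro l x; simp
  | cons d ds ih =>
    intro l x
    rw [List.foldl_cons]
    show List.foldl _ ((l ++ [x]) ++ [(l ++ [x]).getLast! + d]) ds = _
    rw [pvGetLast!_concat, ih (l ++ [x]) (x + d), List.scanl_cons]
    simp

lemma pvCheck_cons (cap s d : Int) (ds : List Int) (h0 : 0 ≤ s) (hc : s ≤ cap) :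
    pvCheck cap s (d :: ds) = pvCheck cap (s + d) ds := by
  unfold pvCheck
  rw [List.scanl_cons, pvGetLast!_cons _ _ (pvScanl_ne_nil _ _), List.all_cons, List.all_cons]
  simp [h0, hc]

lemma pvCheck_no_hi (cap s d : Int) (ds : List Int) (h : cap < s + d) :
    pvCheck cap s (d :: ds) = "NO" := by
  obtain ⟨t, ht⟩ := pvScanl_cons_ex (s + d) ds
  unfold pvCheck
  rw [List.scanl_cons, ht, if_neg]
  simp only [List.all_cons, Bool.and_eq_true, decide_eq_true_eq]
  rintro ⟨⟨-, -, h2, -⟩, -⟩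
  omega

lemma pvCheck_no_lo (cap s d : Int) (ds : List Int) (h : s + d < 0) :
    pvCheck cap s (d :: ds) = "NO" := by
  obtain ⟨t, ht⟩ := pvScanl_cons_ex (s + d) ds
  unfold pvCheck
  rw [List.scanl_cons, ht, if_neg]
  simp only [List.all_cons, Bool.and_eq_true, decide_eq_true_eq]
  rintro ⟨-, -, h2, -⟩
  omega

-- A's loop agrees with the whole-table check, for any in-range running size
lemma pvKey : ∀ (seq : List String) (cap s : Int), 0 ≤ s → s ≤ cap →
    pvGoA seq cap s = pvCheck cap s (seq.map pvDelta) := by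
  intro seq
  induction seq with
  | nil =>
    intro cap s h0 hc
    unfold pvGoA pvCheck
    rw [List.map_nil, List.scanl_nil]
    by_cases h : s = 0 <;> simp [h, h0, hc] <;> omega
  | cons op rest ih =>
    intro cap s h0 hc
    by_cases hS : op == "S"
    · have hd : pvDelta op = 1 := by simp [pvDelta, hS]
      rw [List.map_cons, hd]
      by_cases hover : s + 1 > cap
      · rw [pvCheck_no_hi cap s 1 _ (by omega)]
        simp [pvGoA, hS, hover]
      · rw [pvCheck_cons cap s 1 _ h0 hc, ← ih cap (s + 1) (by omega) (by omega)]
        simp [pvGoA, hS, hover]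
    · by_cases hX : op == "X"
      · have hd : pvDelta op = -1 := by simp [pvDelta, hS, hX]
        rw [List.map_cons, hd]
        by_cases hneg : s - 1 < 0
        · rw [pvCheck_no_lo cap s (-1) _ (by omega)]
          simp [pvGoA, hS, hX, hneg]
        · have he : s + -1 = s - 1 := by ring
          rw [pvCheck_cons cap s (-1) _ h0 hc, he, ← ih cap (s - 1) (by omega) (by omega)]
          simp [pvGoA, hS, hX, hneg]
      · have hd : pvDelta op = 0 := by simp [pvDelta, hS, hX]
        rw [List.map_cons, hd, pvCheck_cons cap s 0 _ h0 hc, add_zero,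
          ← ih cap s h0 hc]
        simp [pvGoA, hS, hX]

-- B's port computes the whole-table check at starting size 0
lemma pvAlt_eq (sequence : List String) (max_capacity : Int) :
    is_valid_stack_sequence_alt sequence max_capacity
      = pvCheck max_capacity 0 (sequence.map pvDelta) := by
  unfold is_valid_stack_sequence_alt pvCheck
  have hf : (fun op => if op == "S" then (1 : Int) else if op == "X" then (-1 : Int) else 0)
      = pvDelta := rfl
  have hb := pvBuild_eq_scanl (sequence.map pvDelta) [] 0
  rw [List.nil_append] at hb
  simp only [hf, hb, List.nil_append]

-- ===== VERDICT (by name: the statement is the Claim_ definition above) =====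
theorem is_valid_stack_sequence_spec : Claim_equal_is_valid_stack_sequence := by
  intro sequence max_capacity _ hpre
  unfold Spec_is_valid_stack_sequence is_valid_stack_sequence
  rw [pvAlt_eq, pvKey sequence max_capacity 0 le_rfl hpre]
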